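-- pv_equiv track=rewrite | github.com/andyW296/quafu-chemistry | src/hamiltonian.py | qham_process
-- ===== SOURCE A (Python) =====
-- def qham_process(qham):
--     qham_out = []
--     qham_len = [0, 1, 2, 3, 4]
--     len_max = max([len(qham[i]) for i in range(1, len(qham), 2)])
--     for k in qham_len:
--         for i in range(1, len(qham), 2):
--             if len(qham[i]) == k:
--                 qham_out.append(qham[i-1])
--                 qham_out.append(qham[i])
--     return qham_out
-- ===== SOURCE B (Python) =====
-- def qham_process(qham):
--     buckets = [[], [], [], [], []]
--     for i in range(1, len(qham), 2):
--         L = len(qham[i])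
--         if L <= 4:
--             buckets[L] += [qham[i - 1], qham[i]]
--     out = []
--     for b in buckets:
--         out += b
--     return out
-- ===== Notes on version B (the rewrite author's own statement) =====
-- stated objective: faster
-- what changed: Replaces A's five repeated scans over the pair list (one per term length 0..4) with a single bucketing pass into five prebuilt buckets followed by one concatenation.
-- outside the precondition, e.g. on qham_process([]): A raises ValueError, B returns []
-- crash fix: On lists with fewer than two elements A raises ValueError (max() of an empty comprehension) while B returns []. — e.g. on qham_process(["0.5"]): A raises ValueError, B returns []
import Mathlib
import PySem

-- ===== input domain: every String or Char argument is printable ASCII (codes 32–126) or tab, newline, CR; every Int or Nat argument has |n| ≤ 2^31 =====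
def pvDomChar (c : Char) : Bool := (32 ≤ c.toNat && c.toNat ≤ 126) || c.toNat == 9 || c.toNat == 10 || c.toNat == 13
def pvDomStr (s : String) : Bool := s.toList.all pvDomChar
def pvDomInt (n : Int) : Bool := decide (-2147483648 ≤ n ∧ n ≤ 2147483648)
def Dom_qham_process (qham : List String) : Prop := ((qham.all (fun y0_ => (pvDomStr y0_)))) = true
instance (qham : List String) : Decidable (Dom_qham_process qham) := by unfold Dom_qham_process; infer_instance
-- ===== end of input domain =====

-- B replaces A's five repeated scans over the pair list (one per term length 0..4)
-- with a single bucketing pass into five prebuilt buckets followed by one concatenation.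


-- ===== PORT A =====
def qham_process (qham : List String) : List String :=
  let qham_len : List Int := [0, 1, 2, 3, 4]
  -- len_max is computed by A (it raises ValueError when the list below is empty; Pre_ excludes that) and is otherwise unused
  let _len_max := PySem.List.max?
      ((PySem.List.pyRange 1 (qham.length : Int) 2).map
        (fun i => PySem.Str.len (PySem.List.pyGetD qham i "")))
      (fun x => x)
  qham_len.foldl (fun qham_out k =>
    (PySem.List.pyRange 1 (qham.length : Int) 2).foldl (fun qham_out i =>
      if PySem.Str.len (PySem.List.pyGetD qham i "") == k then
        (qham_out ++ [PySem.List.pyGetD qham (i - 1) ""]) ++ [PySem.List.pyGetD qham i ""]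
      else qham_out) qham_out) []

-- ===== PORT B =====
def qham_process_alt (qham : List String) : List String :=
  let buckets := (PySem.List.pyRange 1 (qham.length : Int) 2).foldl
    (fun (buckets : List (List String)) i =>
      let L := PySem.Str.len (PySem.List.pyGetD qham i "")
      if L ≤ 4 then
        PySem.List.pySetD buckets L
          (PySem.List.pyGetD buckets L [] ++
            [PySem.List.pyGetD qham (i - 1) "", PySem.List.pyGetD qham i ""])
      else buckets)
    [[], [], [], [], []]
  buckets.foldl (fun out b => out ++ b) []

-- ===== PRECONDITION & SPEC =====
-- A raises ValueError on lists with fewer than two elements (max() of an empty comprehension); Pre_ excludes exactly those.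
def Pre_qham_process (qham : List String) : Prop := 2 ≤ qham.length
instance (qham : List String) : Decidable (Pre_qham_process qham) := by unfold Pre_qham_process; infer_instance
def pvWitness_qham_process : List String := (["0.5", "ZX"])
-- On lists with fewer than two elements A raises ValueError (max() of an empty comprehension) while B returns [].
def Raises_qham_process (qham : List String) : Prop := qham.length < 2
instance (qham : List String) : Decidable (Raises_qham_process qham) := by unfold Raises_qham_process; infer_instance
def pvRaiseWitness_qham_process : List String := (["0.5"])
def pvRaiseWitnessOut_qham_process : List String := []
def Spec_qham_process (qham : List String) (out : List String) : Prop := out = qham_process_alt qham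
instance (qham : List String) (out : List String) : Decidable (Spec_qham_process qham out) := by unfold Spec_qham_process; infer_instance

-- ===== CLAIM (what is proved, stated in full; the proofs are below) =====
def Claim_equal_qham_process : Prop := ∀ (qham : List String), Dom_qham_process qham → Pre_qham_process qham → Spec_qham_process qham (qham_process qham)
def Claim_raises_qham_process : Prop := (∀ (qham : List String), Dom_qham_process qham → Raises_qham_process qham → ¬ Pre_qham_process qham) ∧ (Dom_qham_process (pvRaiseWitness_qham_process) ∧ Raises_qham_process (pvRaiseWitness_qham_process) ∧ qham_process_alt (pvRaiseWitness_qham_process) = pvRaiseWitnessOut_qham_process)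

-- ===== LEMMAS AND PROOFS =====

-- the elements p i of those indices i whose key L i equals k, in order (common generator of both ports)
def pvSel {I A : Type} (L : I → Int) (p : I → List A) (k : Int) (l : List I) : List A :=
  l.flatMap (fun i => if L i == k then p i else [])

-- A's inner loop (two appends under a test) accumulates exactly pvSel
lemma pv_loopA {I A : Type} (L : I → Int) (f g : I → A) (k : Int) (l : List I) (acc : List A) :
    l.foldl (fun out i => if L i == k then (out ++ [f i]) ++ [g i] else out) acc
      = acc ++ pvSel L (fun i => [f i, g i]) k l := by
  induction l generalizing acc with
  | nil => simp [pvSel]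
  | cons i t ih =>
    simp only [List.foldl_cons, pvSel, List.flatMap_cons, ih]
    by_cases h : (L i == k) = true
    · simp [h, List.append_assoc]
    · simp [h]

-- one step of B's bucket loop, when the key is small, is a List.set
lemma pv_step_eval {I A : Type} (L : I → Int) (p : I → List A) (i : I) (m : Nat)
    (hm : L i = (m : Int)) (hm4 : m ≤ 4) (bs : List (List A)) :
    (if L i ≤ 4 then
        PySem.List.pySetD bs (L i) (PySem.List.pyGetD bs (L i) [] ++ p i)
      else bs) = bs.set m (bs.getD m [] ++ p i) := by
  rw [hm, if_pos (by exact_mod_cast hm4)]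
  simp [PySem.List.pySetD_natCast, PySem.List.pyGetD_natCast]

-- B's bucket loop maintains one pvSel per bucket
lemma pv_bucket {I A : Type} (L : I → Int) (hL : ∀ i, 0 ≤ L i) (p : I → List A)
    (l : List I) (b0 b1 b2 b3 b4 : List A) :
    l.foldl (fun buckets i =>
        if L i ≤ 4 then
          PySem.List.pySetD buckets (L i) (PySem.List.pyGetD buckets (L i) [] ++ p i)
        else buckets) [b0, b1, b2, b3, b4]
      = [b0 ++ pvSel L p 0 l, b1 ++ pvSel L p 1 l, b2 ++ pvSel L p 2 l,
         b3 ++ pvSel L p 3 l, b4 ++ pvSel L p 4 l] := by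
  induction l generalizing b0 b1 b2 b3 b4 with
  | nil => simp [pvSel]
  | cons i t ih =>
    obtain ⟨m, hm⟩ : ∃ m : Nat, L i = (m : Int) :=
      ⟨(L i).toNat, (Int.toNat_of_nonneg (hL i)).symm⟩
    simp only [List.foldl_cons, pvSel, List.flatMap_cons]
    by_cases h4 : m ≤ 4
    · rw [pv_step_eval L p i m hm h4]
      interval_cases m <;> simp [ih, pvSel, hm, List.append_assoc]
    · have hle : ¬ ((m : Int) ≤ 4) := by exact_mod_cast h4
      have hne : ∀ k : Int, 0 ≤ k → k ≤ 4 → ((m : Int) == k) = false := by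
        intro k hk0 hk4
        simp only [beq_eq_false_iff_ne, ne_eq]
        omega
      rw [if_neg (show ¬ L i ≤ 4 from hm ▸ hle), ih]
      simp [pvSel, hm, hne 0 (by omega) (by omega), hne 1 (by omega) (by omega),
        hne 2 (by omega) (by omega), hne 3 (by omega) (by omega),
        hne 4 (by omega) (by omega)]

-- ===== VERDICT (by name: the statement is the Claim_ definition above) =====
theorem qham_process_spec : Claim_equal_qham_process := by
  intro qham _ _
  show qham_process qham = qham_process_alt qham
  unfold qham_process qham_process_alt
  simp only [List.foldl_cons, List.foldl_nil, pv_loopA]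
  rw [pv_bucket (fun i => PySem.Str.len (PySem.List.pyGetD qham i ""))
      (fun i => by simp [PySem.Str.len_eq])
      (fun i => [PySem.List.pyGetD qham (i - 1) "", PySem.List.pyGetD qham i ""])]
  simp [List.append_assoc]

@[simp] theorem qham_process_raises : Claim_raises_qham_process := by
  unfold Claim_raises_qham_process
  refine ⟨?_, by decide⟩
  intro q _ h hp
  unfold Pre_qham_process at hp
  unfold Raises_qham_process at h
  omega
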